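-- pv_equiv track=rewrite | github.com/SzybkiRabarbar/CodeWars | 2022-03-29Create Phone Number.py | create_phone_number1
-- ===== SOURCE A (Python) =====
-- def create_phone_number1(n):
--     first =str()
--     seccond =str()
--     three =str()
--
--     for i, num in enumerate(n):
--         if i <= 2:
--             first += str(num)
--         elif i <= 5:
--             seccond += str(num)
--         else:
--             three += str(num)
--
--     return '('+first+') '+seccond+'-'+three
-- ===== SOURCE B (Python) =====
-- def create_phone_number1(n):
--     first = ''.join(str(x) for x in n[:3])
--     seccond = ''.join(str(x) for x in n[3:6])
--     three = ''.join(str(x) for x in n[6:])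
--     return '('+first+') '+seccond+'-'+three
-- ===== Notes on version B (the rewrite author's own statement) =====
-- stated objective: simpler
-- what changed: The index-branching accumulator loop is replaced by three fixed slices n[:3], n[3:6], n[6:], each joined with ''.join; same format string.
import Mathlib
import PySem

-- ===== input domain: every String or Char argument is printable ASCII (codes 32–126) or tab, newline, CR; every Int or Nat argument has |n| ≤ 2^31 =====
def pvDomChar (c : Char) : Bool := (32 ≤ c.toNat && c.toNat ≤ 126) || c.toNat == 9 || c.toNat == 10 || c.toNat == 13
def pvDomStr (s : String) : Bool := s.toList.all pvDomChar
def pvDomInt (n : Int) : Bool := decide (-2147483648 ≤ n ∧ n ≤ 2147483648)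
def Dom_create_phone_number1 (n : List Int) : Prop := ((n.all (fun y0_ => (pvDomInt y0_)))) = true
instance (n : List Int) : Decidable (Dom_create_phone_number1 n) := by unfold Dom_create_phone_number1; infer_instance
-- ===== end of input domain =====

-- B replaces A's index-branching accumulator loop by three fixed slices joined with ''.join (simpler decomposition).

-- ===== PORT A =====
-- the 'for i, num in enumerate(n)' loop, carrying the index and the three string accumulators
def pvLoopA (i : Nat) (l : List Int) (first seccond three : String) :
    String × String × String :=
  match l with
  | [] => (first, seccond, three)
  | num :: rest =>
    if i ≤ 2 then pvLoopA (i + 1) rest (first ++ PySem.Int.toStr num) seccond three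
    else if i ≤ 5 then pvLoopA (i + 1) rest first (seccond ++ PySem.Int.toStr num) three
    else pvLoopA (i + 1) rest first seccond (three ++ PySem.Int.toStr num)

def create_phone_number1 (n : List Int) : String :=
  let r := pvLoopA 0 n "" "" ""
  "(" ++ r.1 ++ ") " ++ r.2.1 ++ "-" ++ r.2.2

-- ===== PORT B =====
-- ''.join(str(x) for x in l)
def pvJoin (l : List Int) : String :=
  match l with
  | [] => ""
  | x :: xs => PySem.Int.toStr x ++ pvJoin xs

def create_phone_number1_alt (n : List Int) : String :=
  let first := pvJoin (PySem.List.slice n none (some 3))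
  let seccond := pvJoin (PySem.List.slice n (some 3) (some 6))
  let three := pvJoin (PySem.List.slice n (some 6) none)
  "(" ++ first ++ ") " ++ seccond ++ "-" ++ three

-- ===== PRECONDITION & SPEC =====
def Spec_create_phone_number1 (n : List Int) (out : String) : Prop := out = create_phone_number1_alt n
instance (n : List Int) (out : String) : Decidable (Spec_create_phone_number1 n out) := by unfold Spec_create_phone_number1; infer_instance

-- ===== CLAIM (what is proved, stated in full; the proofs are below) =====
def Claim_equal_create_phone_number1 : Prop := ∀ (n : List Int), Dom_create_phone_number1 n → Spec_create_phone_number1 n (create_phone_number1 n)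

-- ===== LEMMAS AND PROOFS =====

theorem pvLoopA_eq (l : List Int) : ∀ (i : Nat) (f s t : String),
    pvLoopA i l f s t =
      (f ++ pvJoin (l.take (3 - i)),
       s ++ pvJoin ((l.drop (3 - i)).take ((6 - i) - (3 - i))),
       t ++ pvJoin (l.drop (6 - i))) := by
  induction l with
  | nil => intro i f s t; simp [pvLoopA, pvJoin]
  | cons x xs ih =>
    intro i f s t
    by_cases h2 : i ≤ 2
    · have h3 : 3 - i = (3 - (i + 1)) + 1 := by omega
      have h6 : 6 - i = (6 - (i + 1)) + 1 := by omega
      simp only [pvLoopA, if_pos h2, ih, h3, h6, Nat.succ_sub_succ, List.take_succ_cons,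
        List.drop_succ_cons, pvJoin, String.append_assoc]
    · by_cases h5 : i ≤ 5
      · have h3 : 3 - i = 0 := by omega
        have h3' : 3 - (i + 1) = 0 := by omega
        have h6 : 6 - i = (6 - (i + 1)) + 1 := by omega
        simp only [pvLoopA, if_neg h2, if_pos h5, ih, h3, h3', h6,
          List.take_zero, List.drop_zero, Nat.sub_zero, List.take_succ_cons,
          List.drop_succ_cons, pvJoin, String.append_assoc]
      · have h3 : 3 - i = 0 := by omega
        have h3' : 3 - (i + 1) = 0 := by omega
        have h6 : 6 - i = 0 := by omega
        have h6' : 6 - (i + 1) = 0 := by omega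
        simp only [pvLoopA, if_neg h2, if_neg h5, ih, h3, h3', h6, h6',
          List.take_zero, List.drop_zero, Nat.sub_zero, pvJoin, String.append_assoc]

theorem slice3 (n : List Int) : PySem.List.slice n none (some 3) = n.take 3 := by
  exact PySem.List.slice_to_natCast (b := 3) (xs := n)

theorem slice36 (n : List Int) :
    PySem.List.slice n (some 3) (some 6) = (n.drop 3).take 3 := by
  exact PySem.List.slice_natCast (a := 3) (b := 6) (xs := n)

theorem slice6 (n : List Int) : PySem.List.slice n (some 6) none = n.drop 6 := by
  exact PySem.List.slice_from_natCast (a := 6) (xs := n)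

-- ===== VERDICT (by name: the statement is the Claim_ definition above) =====
theorem create_phone_number1_spec : Claim_equal_create_phone_number1 := by
  intro n _
  show create_phone_number1 n = create_phone_number1_alt n
  simp only [create_phone_number1, create_phone_number1_alt, pvLoopA_eq,
    slice3, slice36, slice6]
  simp
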